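-- pv_equiv track=rewrite | github.com/ThePrankMonkey/codejame_collection | codejam_2019/qualification/b.py | buildLydia
-- ===== SOURCE A (Python) =====
-- def buildLydia(path, grid):
--     lydiacells = [['0']*grid for _i in range(grid)]
--     x,y = 0,0
--     for step in path:
--         lydiacells[x][y] = step
--         if step == "E":
--             y += 1
--         else:
--             x += 1
--     return lydiacells
-- ===== SOURCE B (Python) =====
-- def buildLydia(path, grid):
--     # Closed-form render: step k lands at (k - E_k, E_k) where E_k = number of
--     # 'E' among the first k steps, so cell (x, y) holds step x+y exactly when
--     # x+y < len(path) and the E-prefix-count at x+y equals y.  Build the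
--     # prefix-count table once, then compute every grid cell directly.
--     pref = [0]
--     last = 0
--     for s in path:
--         last += (s == "E")
--         pref.append(last)
--     n = len(path)
--     return [[path[x + y] if x + y < n and pref[x + y] == y else '0'
--              for y in range(grid)] for x in range(grid)]
-- ===== Notes on version B (the rewrite author's own statement) =====
-- stated objective: alternative
-- what changed: B does not simulate the walk or mutate a grid: it builds a prefix table of E-counts and then computes each cell (x,y) directly by the closed-form rule 'cell holds step x+y iff x+y < len(path) and the E-count of the first x+y steps equals y', rendering the grid in one pure comprehension.
import Mathlib
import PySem

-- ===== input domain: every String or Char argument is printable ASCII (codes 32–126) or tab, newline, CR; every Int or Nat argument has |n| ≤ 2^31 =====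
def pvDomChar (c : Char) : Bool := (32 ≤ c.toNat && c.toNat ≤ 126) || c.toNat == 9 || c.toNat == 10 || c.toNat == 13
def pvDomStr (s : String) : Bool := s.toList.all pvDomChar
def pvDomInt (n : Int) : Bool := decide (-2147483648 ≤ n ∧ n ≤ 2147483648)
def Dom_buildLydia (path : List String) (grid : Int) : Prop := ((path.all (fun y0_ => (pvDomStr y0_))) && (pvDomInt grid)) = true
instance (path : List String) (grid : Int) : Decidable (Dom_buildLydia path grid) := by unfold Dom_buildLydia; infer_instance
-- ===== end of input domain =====

-- B replaces A's walk-and-mutate simulation by a closed-form render: a prefix table of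
-- E-counts plus the rule "cell (x,y) holds step x+y iff x+y < len(path) and the
-- E-count of the first x+y steps equals y".

-- ===== PORT A =====
-- loop body of A: assign lydiacells[x][y] = step, then advance (x, y).
-- lydiacells[x][y] = step is List.set at x.toNat / y.toNat: x, y start at 0 and only grow,
-- so .toNat is exact; within Pre_ both indices are in range (out of range Python raises,
-- and those inputs are excluded by Pre_).
def buildLydiaStepA (st : List (List String) × Int × Int) (step : String) :
    List (List String) × Int × Int :=
  let c := st.1
  let x := st.2.1
  let y := st.2.2
  let c' := c.set x.toNat ((c.getD x.toNat []).set y.toNat step)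
  if step == "E" then (c', x, y + 1) else (c', x + 1, y)

def buildLydia (path : List String) (grid : Int) : List (List String) :=
  let lydiacells := (PySem.List.pyRange 0 grid 1).map (fun _ => List.replicate grid.toNat "0")
  (path.foldl buildLydiaStepA (lydiacells, 0, 0)).1

-- ===== PORT B =====
-- loop body of B's prefix pass: last += (s == "E"); pref.append(last)
def buildLydiaPrefStep (st : List Int × Int) (s : String) : List Int × Int :=
  let last := st.2 + (if s == "E" then 1 else 0)
  (st.1 ++ [last], last)

-- B's comprehension: path[x+y] if x+y < n and pref[x+y] == y else '0'.
-- x + y is nonnegative and, when the first conjunct holds, a valid index of pref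
-- and path (Python raises no error there), so getD at (x+y).toNat is exact.
def buildLydia_alt (path : List String) (grid : Int) : List (List String) :=
  let pref := (path.foldl buildLydiaPrefStep ([0], 0)).1
  let n : Int := path.length
  (PySem.List.pyRange 0 grid 1).map (fun x =>
    (PySem.List.pyRange 0 grid 1).map (fun y =>
      if x + y < n ∧ pref.getD (x + y).toNat 0 = y then path.getD (x + y).toNat "" else "0"))

-- ===== PRECONDITION & SPEC =====
-- Pre_ excludes exactly the inputs on which A raises IndexError: a non-empty path whose
-- walk leaves the grid × grid square (the positions are monotone, so the position at the
-- last step — E-count and non-E-count of path.dropLast — bounds them all).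
def Pre_buildLydia (path : List String) (grid : Int) : Prop :=
  path = [] ∨
    ((path.dropLast.count "E" : Int) < grid ∧
     (path.length : Int) - 1 - (path.dropLast.count "E" : Int) < grid)
instance (path : List String) (grid : Int) : Decidable (Pre_buildLydia path grid) := by
  unfold Pre_buildLydia; infer_instance

def pvWitness_buildLydia : List String × Int := (["E", "S", "E"], 3)

def Spec_buildLydia (path : List String) (grid : Int) (out : List (List String)) : Prop :=
  out = buildLydia_alt path grid
instance (path : List String) (grid : Int) (out : List (List String)) :
    Decidable (Spec_buildLydia path grid out) := by unfold Spec_buildLydia; infer_instance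

-- ===== CLAIM (what is proved, stated in full; the proofs are below) =====
def Claim_equal_buildLydia : Prop := ∀ (path : List String) (grid : Int),
  Dom_buildLydia path grid → Pre_buildLydia path grid →
    Spec_buildLydia path grid (buildLydia path grid)

-- ===== LEMMAS AND PROOFS =====

-- number of "E" steps in a list, as an Int
def pvCntE (l : List String) : Int := (l.countP (fun s => s == "E") : Int)

-- a grid given by a cell function
def pvRenderF (g : Int) (f : Int → Int → String) : List (List String) :=
  (PySem.List.pyRange 0 g 1).map (fun x => (PySem.List.pyRange 0 g 1).map (fun y => f x y))

-- every assignment of A's walk starting at (x, y) stays inside the g × g square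
def pvOk : List String → Int → Int → Int → Prop
  | [], _, _, _ => True
  | s :: rest, x, y, g =>
      x < g ∧ y < g ∧ pvOk rest (if s == "E" then x else x + 1) (if s == "E" then y + 1 else y) g

-- renders of pointwise-equal cell functions coincide
lemma pvRenderF_congr (g : Int) (f1 f2 : Int → Int → String)
    (h : ∀ x y : Int, 0 ≤ x → x < g → 0 ≤ y → y < g → f1 x y = f2 x y) :
    pvRenderF g f1 = pvRenderF g f2 := by
  unfold pvRenderF
  apply List.map_congr_left
  intro x hx
  beta_reduce
  apply List.map_congr_left
  intro y hy
  rw [PySem.List.mem_pyRange_one] at hx hy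
  exact h x y hx.1 hx.2 hy.1 hy.2

-- writing step at in-bounds (x0, y0) into a rendered grid renders the updated cell function
lemma pvRenderF_set (g : Int) (f : Int → Int → String) (x0 y0 : Int) (step : String)
    (hx0 : 0 ≤ x0) (hxg : x0 < g) (hy0 : 0 ≤ y0) (hyg : y0 < g) :
    (pvRenderF g f).set x0.toNat (((pvRenderF g f).getD x0.toNat []).set y0.toNat step) =
      pvRenderF g (fun x y => if x = x0 ∧ y = y0 then step else f x y) := by
  have _ := hyg
  have hxlt : x0.toNat < (g - 0).toNat := by omega
  apply List.ext_getElem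
  · simp [pvRenderF]
  · intro k h1 h2
    simp only [pvRenderF, List.length_set, List.length_map, PySem.List.length_pyRange_one] at h1 h2 ⊢
    rw [List.getElem_set]
    have hgd : ((PySem.List.pyRange 0 g 1).map (fun x' =>
        (PySem.List.pyRange 0 g 1).map (fun y' => f x' y'))).getD x0.toNat [] =
        (PySem.List.pyRange 0 g 1).map (fun y' => f x0 y') := by
      rw [List.getD_eq_getElem _ _ (by simpa using hxlt)]
      simp [PySem.List.getElem_pyRange_one, Int.toNat_of_nonneg hx0]
    split
    · rename_i hk
      rw [hgd]
      have hxk : (0 : Int) + (k : Int) = x0 := by omega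
      apply List.ext_getElem
      · simp
      · intro j hj1 hj2
        simp only [List.length_set, List.length_map, PySem.List.length_pyRange_one] at hj1 hj2
        rw [List.getElem_set]
        simp only [List.getElem_map, PySem.List.getElem_pyRange_one, hxk]
        by_cases hjy : y0.toNat = j
        · simp [hjy, show (0 : Int) + (j : Int) = y0 by omega]
        · rw [if_neg hjy, if_neg (by rintro ⟨_, h⟩; omega)]
    · rename_i hk
      simp only [List.getElem_map, PySem.List.getElem_pyRange_one]
      apply List.map_congr_left
      intro a _
      rw [if_neg (show ¬((0:Int) + (k:Int) = x0 ∧ a = y0) by rintro ⟨h, _⟩; omega)]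

-- A's fold computes the closed-form cell function: cell (x, y) gets step j exactly when
-- j = x + y - x0 - y0 is a valid index and the E-count of the first j steps is y - y0
lemma pvMainA (path : List String) : ∀ (f : Int → Int → String) (x0 y0 g : Int),
    0 ≤ x0 → 0 ≤ y0 → pvOk path x0 y0 g →
    (path.foldl buildLydiaStepA (pvRenderF g f, x0, y0)).1 =
      pvRenderF g (fun x y =>
        if 0 ≤ x + y - x0 - y0 ∧ x + y - x0 - y0 < (path.length : Int) ∧
            pvCntE (path.take (x + y - x0 - y0).toNat) = y - y0
        then path.getD (x + y - x0 - y0).toNat "" else f x y) := by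
  induction path with
  | nil =>
    intro f x0 y0 g _ _ _
    simp only [List.foldl_nil]
    apply pvRenderF_congr
    intro x y _ _ _ _
    beta_reduce
    rw [if_neg (by rintro ⟨h1, h2, _⟩; simp at h2; omega)]
  | cons s rest ih =>
    intro f x0 y0 g hx0 hy0 hok
    obtain ⟨hxg, hyg, hok'⟩ := hok
    simp only [List.foldl_cons, buildLydiaStepA]
    rw [pvRenderF_set g f x0 y0 s hx0 hxg hy0 hyg]
    set f1 : Int → Int → String := fun x y => if x = x0 ∧ y = y0 then s else f x y with hf1
    have heps : ∀ (x1 y1 : Int), x1 = (if s == "E" then x0 else x0 + 1) →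
        y1 = (if s == "E" then y0 + 1 else y0) →
        (rest.foldl buildLydiaStepA (pvRenderF g f1, x1, y1)).1 =
          pvRenderF g (fun x y =>
            if 0 ≤ x + y - x1 - y1 ∧ x + y - x1 - y1 < (rest.length : Int) ∧
                pvCntE (rest.take (x + y - x1 - y1).toNat) = y - y1
            then rest.getD (x + y - x1 - y1).toNat "" else f1 x y) := by
      intro x1 y1 hx1 hy1
      apply ih f1 x1 y1 g
      · subst hx1; split <;> omega
      · subst hy1; split <;> omega
      · subst hx1; subst hy1; exact hok'
    by_cases hs : s == "E"
    · simp only [hs, if_pos]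
      rw [heps x0 (y0 + 1) (by simp [hs]) (by simp [hs])]
      apply pvRenderF_congr
      intro x y hx0' hxg' hy0' hyg'
      beta_reduce
      by_cases hj : 0 ≤ x + y - x0 - y0
      · rcases (by omega : x + y - x0 - y0 = 0 ∨ 1 ≤ x + y - x0 - y0) with h0 | h1
        · -- j = 0: only cell (x0, y0) can be written, by step s
          rw [if_neg (by rintro ⟨h, _⟩; omega)]
          by_cases hyy : y = y0
          · have hxx : x = x0 := by omega
            have hz : (x + y - x0 - y0).toNat = 0 := by omega
            rw [if_pos ⟨by omega, by simp; omega, by rw [hz]; simp [pvCntE, hyy]⟩, hz]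
            simp [hf1, hxx, hyy]
          · rw [if_neg (by
              rintro ⟨_, _, hc⟩
              rw [show (x + y - x0 - y0).toNat = 0 by omega] at hc
              simp [pvCntE] at hc
              omega)]
            simp only [hf1]
            rw [if_neg (by rintro ⟨_, h⟩; exact hyy h)]
        · -- j ≥ 1: the write goes through to rest, one index earlier
          have ht : (x + y - x0 - y0).toNat = (x + y - x0 - (y0+1)).toNat + 1 := by omega
          have htake : (s :: rest).take (x + y - x0 - y0).toNat =
              s :: rest.take (x + y - x0 - (y0+1)).toNat := by rw [ht]; rfl
          have hcnt : pvCntE ((s :: rest).take (x + y - x0 - y0).toNat) =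
              1 + pvCntE (rest.take (x + y - x0 - (y0+1)).toNat) := by
            rw [htake]
            simp only [pvCntE, List.countP_cons, hs]
            push_cast
            omega
          have hget : (s :: rest).getD (x + y - x0 - y0).toNat "" =
              rest.getD (x + y - x0 - (y0+1)).toNat "" := by rw [ht]; rfl
          by_cases hc : 0 ≤ x + y - x0 - (y0+1) ∧ x + y - x0 - (y0+1) < (rest.length : Int) ∧
              pvCntE (rest.take (x + y - x0 - (y0+1)).toNat) = y - (y0+1)
          · rw [if_pos hc, if_pos ⟨by omega, by simp; omega, by rw [hcnt]; omega⟩, hget]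
          · rw [if_neg hc, if_neg (by
              rintro ⟨_, hlen, hcc⟩
              rw [hcnt] at hcc
              refine hc ⟨by omega, by simp at hlen; omega, by omega⟩)]
            simp only [hf1]
            rw [if_neg (by rintro ⟨h1', h2'⟩; omega)]
      · rw [if_neg (by rintro ⟨h, _⟩; omega), if_neg (by rintro ⟨h, _⟩; omega)]
        simp only [hf1]
        rw [if_neg (by rintro ⟨h1', h2'⟩; omega)]
    · simp only [hs, Bool.false_eq_true, if_false]
      rw [heps (x0 + 1) y0 (by simp [hs]) (by simp [hs])]
      apply pvRenderF_congr
      intro x y hx0' hxg' hy0' hyg'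
      beta_reduce
      by_cases hj : 0 ≤ x + y - x0 - y0
      · rcases (by omega : x + y - x0 - y0 = 0 ∨ 1 ≤ x + y - x0 - y0) with h0 | h1
        · rw [if_neg (by rintro ⟨h, _⟩; omega)]
          by_cases hyy : y = y0
          · have hxx : x = x0 := by omega
            have hz : (x + y - x0 - y0).toNat = 0 := by omega
            rw [if_pos ⟨by omega, by simp; omega, by rw [hz]; simp [pvCntE, hyy]⟩, hz]
            simp [hf1, hxx, hyy]
          · rw [if_neg (by
              rintro ⟨_, _, hc⟩
              rw [show (x + y - x0 - y0).toNat = 0 by omega] at hc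
              simp [pvCntE] at hc
              omega)]
            simp only [hf1]
            rw [if_neg (by rintro ⟨_, h⟩; exact hyy h)]
        · have ht : (x + y - x0 - y0).toNat = (x + y - (x0+1) - y0).toNat + 1 := by omega
          have htake : (s :: rest).take (x + y - x0 - y0).toNat =
              s :: rest.take (x + y - (x0+1) - y0).toNat := by rw [ht]; rfl
          have hcnt : pvCntE ((s :: rest).take (x + y - x0 - y0).toNat) =
              pvCntE (rest.take (x + y - (x0+1) - y0).toNat) := by
            rw [htake]
            simp only [pvCntE, List.countP_cons, hs]
            push_cast
            omega
          have hget : (s :: rest).getD (x + y - x0 - y0).toNat "" =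
              rest.getD (x + y - (x0+1) - y0).toNat "" := by rw [ht]; rfl
          by_cases hc : 0 ≤ x + y - (x0+1) - y0 ∧ x + y - (x0+1) - y0 < (rest.length : Int) ∧
              pvCntE (rest.take (x + y - (x0+1) - y0).toNat) = y - y0
          · rw [if_pos hc, if_pos ⟨by omega, by simp; omega, by rw [hcnt]; omega⟩, hget]
          · rw [if_neg hc, if_neg (by
              rintro ⟨_, hlen, hcc⟩
              rw [hcnt] at hcc
              refine hc ⟨by omega, by simp at hlen; omega, by omega⟩)]
            simp only [hf1]
            rw [if_neg (by rintro ⟨h1', h2'⟩; omega)]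
      · rw [if_neg (by rintro ⟨h, _⟩; omega), if_neg (by rintro ⟨h, _⟩; omega)]
        simp only [hf1]
        rw [if_neg (by rintro ⟨h1', h2'⟩; omega)]

-- B's prefix fold yields the table of E-counts of the prefixes
lemma pvPref_fold (path : List String) : ∀ (p : List Int) (l : Int),
    (path.foldl buildLydiaPrefStep (p, l)).1 =
      p ++ (List.range path.length).map (fun k => l + pvCntE (path.take (k + 1))) := by
  induction path with
  | nil => intro p l; simp
  | cons s rest ih =>
    intro p l
    simp only [List.foldl_cons, buildLydiaPrefStep]
    rw [ih]
    rw [List.length_cons, List.range_succ_eq_map]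
    simp only [List.map_cons, List.map_map]
    rw [List.append_assoc]
    congr 1
    simp only [List.take_succ_cons, List.singleton_append]
    congr 1
    · simp only [pvCntE, List.take_zero, List.countP_cons, List.countP_nil]
      push_cast
      split <;> omega
    · apply List.map_congr_left
      intro k _
      simp only [Function.comp, pvCntE, List.countP_cons, Nat.succ_eq_add_one]
      push_cast
      split <;> omega

-- reading B's table at a valid prefix index gives the E-count of that prefix
lemma pvPref_getD (path : List String) (j : Nat) (hj : j ≤ path.length) :
    ((path.foldl buildLydiaPrefStep ([0], 0)).1).getD j 0 = pvCntE (path.take j) := by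
  rw [pvPref_fold]
  cases j with
  | zero => simp [pvCntE]
  | succ k =>
    have hk : k < path.length := by omega
    simp only [List.singleton_append, List.getD_cons_succ]
    rw [List.getD_eq_getElem _ _ (by simpa using hk)]
    simp

-- A's initial all-'0' grid is the rendering of the constant cell function
lemma pvInit (g : Int) :
    (PySem.List.pyRange 0 g 1).map (fun _ => List.replicate g.toNat "0") =
      pvRenderF g (fun _ _ => "0") := by
  unfold pvRenderF
  apply List.map_congr_left
  intro x _
  simp [List.map_const', PySem.List.length_pyRange_one]

-- the bound at the LAST assignment (counts over path.dropLast) bounds every assignment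
lemma pvOk_of_bounds (path : List String) : ∀ (x y g : Int),
    (path ≠ [] →
      x + (path.dropLast.countP (fun s => !(s == "E")) : Int) < g ∧
      y + (path.dropLast.count "E" : Int) < g) →
    pvOk path x y g := by
  induction path with
  | nil => intro x y g _; trivial
  | cons s rest ih =>
    intro x y g h
    obtain ⟨hx, hy⟩ := h (by simp)
    match rest with
    | [] =>
      simp at hx hy
      exact ⟨hx, hy, trivial⟩
    | t :: ts =>
      rw [List.dropLast_cons_of_ne_nil (by simp)] at hx hy
      have hcP : ((s :: (t :: ts).dropLast).countP (fun s => !(s == "E")) : Int)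
          = ((t :: ts).dropLast.countP (fun s => !(s == "E")) : Int) + (if s == "E" then 0 else 1) := by
        simp [List.countP_cons]
      have hcE : ((s :: (t :: ts).dropLast).count "E" : Int)
          = ((t :: ts).dropLast.count "E" : Int) + (if s == "E" then 1 else 0) := by
        simp [List.count_cons]
      rw [hcP] at hx; rw [hcE] at hy
      have h1 : (0:Int) ≤ ((t :: ts).dropLast.countP (fun s => !(s == "E")) : Int) := by positivity
      have h2 : (0:Int) ≤ ((t :: ts).dropLast.count "E" : Int) := by positivity
      refine ⟨by split at hx <;> omega, by split at hy <;> omega, ?_⟩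
      apply ih
      intro _
      constructor
      · split <;> split at hx <;> simp_all <;> omega
      · split <;> split at hy <;> simp_all <;> omega

-- ===== VERDICT (by name: the statement is the Claim_ definition above) =====
theorem buildLydia_spec : Claim_equal_buildLydia := by
  intro path grid _ hpre
  simp only [Spec_buildLydia, buildLydia, buildLydia_alt]
  have hok : pvOk path 0 0 grid := by
    apply pvOk_of_bounds
    intro hne
    have hlen : path.dropLast.count "E" + path.dropLast.countP (fun s => !(s == "E"))
        = path.dropLast.length := by
      rw [List.count]
      have h := (path.dropLast.length_eq_countP_add_countP (· == "E")).symm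
      simpa using h
    have hld : path.dropLast.length = path.length - 1 := List.length_dropLast
    have hlen1 : 1 ≤ path.length := by
      cases path with
      | nil => exact absurd rfl hne
      | cons a b => simp
    rcases hpre with h | ⟨hE, hX⟩
    · exact absurd h hne
    · exact ⟨by omega, by omega⟩
  rw [pvInit grid]
  rw [pvMainA path (fun _ _ => "0") 0 0 grid le_rfl le_rfl hok]
  apply pvRenderF_congr
  intro x y hx0 hxg hy0 hyg
  beta_reduce
  simp only [Int.sub_zero]
  by_cases hlt : x + y < (path.length : Int)
  · rw [pvPref_getD path (x + y).toNat (by omega)]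
    by_cases hc : pvCntE (path.take (x + y).toNat) = y
    · rw [if_pos ⟨by omega, hlt, hc⟩, if_pos ⟨hlt, hc⟩]
    · rw [if_neg (by rintro ⟨_, _, h⟩; exact hc h),
          if_neg (by rintro ⟨_, h⟩; exact hc h)]
  · rw [if_neg (by rintro ⟨_, h, _⟩; omega), if_neg (by rintro ⟨h, _⟩; omega)]
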